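-- pv_equiv track=rewrite | github.com/dldbdud314/PS | 백준/1213.py | solution
-- ===== SOURCE A (Python) =====
-- from collections import Counter
--
-- def solution(name):
--     counter = Counter(name)
--     odd_cnt = 0
--     for v in counter.values():
--         if v % 2 == 1: odd_cnt += 1
--     if odd_cnt > 1:
--         return "I'm Sorry Hansoo"
--     else:
--         pelindrome = [''] * len(name)
--         if odd_cnt == 1:
--             odd_key = 0
--             for k, v in counter.items():
--                 if v % 2 == 1: odd_key = k
--             pelindrome[len(name)//2] = odd_key
--             counter[odd_key] -= 1
--         name_count = list(map(lambda x : (x[0], x[1] // 2), sorted(counter.items())))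
--         name_lst = ''
--         for k, v in name_count:
--             name_lst += (k * v)
--         s, e = 0, len(name) - 1
--         for x in name_lst:
--             pelindrome[s] = x
--             pelindrome[e] = x
--             s += 1
--             e -= 1
--         return ''.join(pelindrome)
-- ===== SOURCE B (Python) =====
-- def solution(name):
--     s = sorted(name)
--     half = []
--     odd = ''
--     i = 0
--     n = len(s)
--     while i < n:
--         if i + 1 < n and s[i] == s[i + 1]:
--             half.append(s[i])
--             i += 2
--         else:
--             if odd:
--                 return "I'm Sorry Hansoo"
--             odd = s[i]
--             i += 1
--     h = ''.join(half)
--     return h + odd + h[::-1]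
-- ===== Notes on version B (the rewrite author's own statement) =====
-- stated objective: alternative
-- what changed: B never builds a character counter: it sorts the whole string and does a single pairing scan over the sorted characters (equal adjacent pair -> goes to the half, unpaired leftover -> the middle, second leftover -> early sentinel return), then returns half + middle + reversed half, instead of A's Counter, odd-count tally, counter mutation, sorted items and two-pointer buffer fill.
import Mathlib
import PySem

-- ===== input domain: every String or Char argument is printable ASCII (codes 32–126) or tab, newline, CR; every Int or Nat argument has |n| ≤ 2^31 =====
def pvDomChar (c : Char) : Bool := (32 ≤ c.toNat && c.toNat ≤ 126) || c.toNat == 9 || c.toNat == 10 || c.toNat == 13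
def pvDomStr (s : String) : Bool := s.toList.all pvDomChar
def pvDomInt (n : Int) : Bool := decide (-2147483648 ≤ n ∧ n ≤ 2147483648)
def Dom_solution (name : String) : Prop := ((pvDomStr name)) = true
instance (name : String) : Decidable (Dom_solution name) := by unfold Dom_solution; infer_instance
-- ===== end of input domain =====

-- B drops A's Counter entirely: it sorts the string and pairs up equal adjacent
-- characters in one scan, the unpaired leftover becoming the middle (objective: alternative).

-- ===== PORT A =====

-- the `for x in name_lst: pelindrome[s] = x; pelindrome[e] = x; s += 1; e -= 1` loop
def pvFillA : List Char → List String → Int → Int → List String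
  | [], p, _, _ => p
  | x :: xs, p, s, e =>
      pvFillA xs (PySem.List.pySetD (PySem.List.pySetD p s (String.ofList [x])) e (String.ofList [x])) (s + 1) (e - 1)

def solution (name : String) : String :=
  let cs := name.toList
  let counter := PySem.Dict.counter cs
  let odd_cnt : Int :=
    counter.values.foldl (fun acc v => if PySem.Int.mod v 2 = 1 then acc + 1 else acc) 0
  if odd_cnt > 1 then "I'm Sorry Hansoo"
  else
    let pelindrome : List String := List.replicate cs.length ""
    -- Python's `odd_key = 0` sentinel is an int and cannot inhabit Char, so the scan
    -- carries an Option Char; when odd_cnt = 1 the loop always finds the key, and the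
    -- `none` branch (Python would index with the int 0) is unreachable.
    let pc : List String × PySem.Dict Char Int :=
      if odd_cnt = 1 then
        let odd_key : Option Char :=
          counter.items.foldl (fun acc kv => if PySem.Int.mod kv.2 2 = 1 then some kv.1 else acc) none
        match odd_key with
        | some k =>
            (PySem.List.pySetD pelindrome (PySem.Int.floordiv (cs.length : Int) 2) (String.ofList [k]),
             counter.modify k 0 (· - 1))
        | none => (pelindrome, counter)
      else (pelindrome, counter)
    let name_count :=
      (PySem.List.sorted2 pc.2.items (fun p => p.1) (fun p => p.2)).map
        (fun p => (p.1, PySem.Int.floordiv p.2 2))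
    let name_lst : List Char :=
      name_count.foldl (fun acc kv => acc ++ List.replicate kv.2.toNat kv.1) []
    PySem.Str.join "" (pvFillA name_lst pc.1 0 ((cs.length : Int) - 1))

-- ===== PORT B =====

-- the `while i < n:` pairing scan of Source B over the sorted characters: `none` is the
-- early `return "I'm Sorry Hansoo"`, otherwise the (half, odd) pair at loop exit
def pvScanB : List Char → List Char → String → Option (List Char × String)
  | x :: y :: rest, half, odd =>
      if x = y then pvScanB rest (half ++ [x]) odd
      else if odd ≠ "" then none
      else pvScanB (y :: rest) half (String.ofList [x])
  | [x], half, odd => if odd ≠ "" then none else some (half, String.ofList [x])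
  | [], half, odd => some (half, odd)
  termination_by l _ _ => l.length

def solution_alt (name : String) : String :=
  let s := PySem.List.sorted name.toList (fun x => x)
  match pvScanB s [] "" with
  | none => "I'm Sorry Hansoo"
  | some (h, odd) => String.ofList (h ++ odd.toList ++ h.reverse)

-- ===== PRECONDITION & SPEC =====
def Spec_solution (name : String) (out : String) : Prop := out = solution_alt name
instance (name : String) (out : String) : Decidable (Spec_solution name out) := by unfold Spec_solution; infer_instance

-- ===== CLAIM (what is proved, stated in full; the proofs are below) =====
def Claim_equal_solution : Prop := ∀ (name : String), Dom_solution name → Spec_solution name (solution name)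

-- ===== LEMMAS AND PROOFS =====

-- the common canonical form both ports are reduced to
def pvHalf (cs : List Char) : List Char :=
  (PySem.List.sorted (PySem.Set.ofList cs) (fun x => x)).flatMap
    (fun k => List.replicate (cs.count k / 2) k)

def pvOdds (cs : List Char) : List Char :=
  (PySem.Set.ofList cs).filter (fun k => cs.count k % 2 == 1)

def pvCanon (name : String) : String :=
  let cs := name.toList
  if 1 < (pvOdds cs).length then "I'm Sorry Hansoo"
  else String.ofList (pvHalf cs ++ (pvOdds cs).take 1 ++ (pvHalf cs).reverse)

theorem foldl_if_filter_nil {α β : Type} (p : α → Bool) (g : α → β) :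
    ∀ (l : List α) (init : β), (∀ a ∈ l, p a = false) →
      l.foldl (fun acc x => if p x then g x else acc) init = init := by
  intro l
  induction l with
  | nil => intro init _; rfl
  | cons x t ih =>
      intro init h
      have hx : p x = false := h x (by simp)
      simp [List.foldl_cons, hx, ih _ (fun a ha => h a (by simp [ha]))]

theorem foldl_if_filter_singleton {α β : Type} (p : α → Bool) (g : α → β) (a : α) :
    ∀ (l : List α) (init : β), l.filter p = [a] →
      l.foldl (fun acc x => if p x then g x else acc) init = g a := by
  intro l
  induction l with
  | nil => intro init h; simp at h
  | cons x t ih =>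
      intro init h
      by_cases hx : p x = true
      · simp [hx] at h
        obtain ⟨h1, h2⟩ := h
        subst h1
        rw [List.foldl_cons, if_pos hx]
        exact foldl_if_filter_nil p g t _ h2
      · simp [hx] at h
        simp [List.foldl_cons, hx, ih _ h]

theorem sorted2_eq_sorted_lex {α κ₁ κ₂ : Type} [LinearOrder κ₁] [LinearOrder κ₂]
    (xs : List α) (k1 : α → κ₁) (k2 : α → κ₂) :
    PySem.List.sorted2 xs k1 k2 = PySem.List.sorted xs (fun a => toLex (k1 a, k2 a)) := by
  have hb : (fun a b => decide (k1 a < k1 b) || (!decide (k1 b < k1 a) && decide (k2 a < k2 b)))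
      = (fun a b : α => decide ((toLex (k1 a, k2 a) : Lex (κ₁ × κ₂)) < toLex (k1 b, k2 b))) := by
    funext a b
    by_cases h1 : k1 a < k1 b
    · simp [h1, Prod.Lex.lt_iff]
    · by_cases h2 : k1 b < k1 a
      · simp [h1, h2, Prod.Lex.lt_iff]
        intro he; exact absurd (he ▸ h2) (lt_irrefl _)
      · have he : k1 a = k1 b := le_antisymm (not_lt.1 h2) (not_lt.1 h1)
        simp [he, Prod.Lex.lt_iff]
  unfold PySem.List.sorted2 PySem.List.sorted
  simp only [hb]
  rfl

-- sorted(counter-like items) when the keys are the distinct chars of cs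
theorem sorted2_ofList_map (cs : List Char) (f : Char → Int) :
    PySem.List.sorted2 ((PySem.Set.ofList cs).map (fun k => (k, f k))) (fun p => p.1) (fun p => p.2)
      = (PySem.List.sorted (PySem.Set.ofList cs) (fun x => x)).map (fun k => (k, f k)) := by
  rw [sorted2_eq_sorted_lex]
  apply PySem.List.sorted_eq_of_perm_of_pairwise_lt
  · exact (PySem.List.sorted_perm (PySem.Set.ofList cs) (fun x => x) false).map _
  · refine List.Pairwise.map _ ?_ (PySem.List.sorted_ofList_pairwise_lt cs)
    intro a b hab
    exact Prod.Lex.lt_iff.2 (Or.inl hab)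

-- `counter[a] -= 1` on a present key rewrites just that item's value
theorem items_modify_counter (cs : List Char) (a : Char) (ha : a ∈ cs) :
    ((PySem.Dict.counter cs).modify a 0 (· - 1)).items
      = (PySem.Set.ofList cs).map
          (fun k => (k, if k = a then (cs.count a : Int) - 1 else (cs.count k : Int))) := by
  unfold PySem.Dict.modify PySem.Dict.insert
  rw [PySem.Dict.contains_counter]
  simp only [List.contains_eq_mem, ha, decide_true, if_pos]
  rw [PySem.Dict.getD_counter, PySem.Dict.items_counter, List.map_map]
  apply List.map_congr_left
  intro k _
  by_cases hk : k = a
  · simp [hk]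
  · simp [hk, Function.comp]

-- (m-1)//2 = m//2 for odd m
theorem floordiv_pred_odd (m : Nat) (h : m % 2 = 1) :
    PySem.Int.floordiv ((m : Int) - 1) 2 = PySem.Int.floordiv (m : Int) 2 := by
  rw [PySem.Int.floordiv_eq_ediv_of_pos (by norm_num), PySem.Int.floordiv_eq_ediv_of_pos (by norm_num)]
  omega

-- total length is twice the half plus the number of odd counts
theorem sum_eq_two_halves_add_odds (c : Char → Nat) :
    ∀ l : List Char, (l.map c).sum
      = 2 * (l.map (fun k => c k / 2)).sum + l.countP (fun k => c k % 2 == 1) := by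
  intro l
  induction l with
  | nil => simp
  | cons x t ih =>
      simp only [List.map_cons, List.sum_cons, List.countP_cons, ih]
      by_cases hx : c x % 2 = 1 <;> simp [hx] <;> omega

-- the distinct chars of cs, any order, count up to cs.length
theorem sum_counts_eq_length (cs : List Char) (l : List Char)
    (hp : l.Perm (PySem.Set.ofList cs)) :
    (l.map (fun k => cs.count k)).sum = cs.length := by
  have h1 : l.Perm cs.dedup := by
    refine hp.trans ?_
    rw [List.perm_ext_iff_of_nodup (PySem.Set.nodup_ofList cs) (List.nodup_dedup cs)]
    intro a
    rw [PySem.Set.mem_ofList, List.mem_dedup]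
  calc (l.map (fun k => cs.count k)).sum
      = (cs.dedup.map (fun k => cs.count k)).sum := (h1.map _).sum_eq
    _ = cs.length := List.sum_map_count_dedup_eq_length cs

theorem set_append_length {α : Type} (u v : List α) (y x : α) :
    (u ++ y :: v).set u.length x = u ++ x :: v := by
  simp

theorem pvFillA_spec :
    ∀ (xs : List Char) (pre mid post : List String), 2 * xs.length ≤ mid.length →
      pvFillA xs (pre ++ mid ++ post) (pre.length : Int) ((pre.length : Int) + mid.length - 1)
        = pre ++ xs.map (fun c => String.ofList [c])
            ++ (mid.drop xs.length).take (mid.length - 2 * xs.length)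
            ++ (xs.map (fun c => String.ofList [c])).reverse ++ post := by
  intro xs
  induction xs with
  | nil => intro pre mid post _; simp [pvFillA]
  | cons x t ih =>
      intro pre mid post hlen
      simp only [List.length_cons] at hlen
      obtain ⟨m0, rest, rfl⟩ : ∃ m0 rest, mid = m0 :: rest := by
        cases mid with
        | nil => simp at hlen
        | cons m0 rest => exact ⟨m0, rest, rfl⟩
      rcases rest.eq_nil_or_concat with rfl | ⟨l, b, rfl⟩
      · have h1 : (2 : Nat) * (t.length + 1) ≤ 1 := by simpa using hlen
        omega
      simp only [List.concat_eq_append] at *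
      have hl : 2 * t.length ≤ l.length := by
        simp at hlen; omega
      simp only [pvFillA]
      rw [PySem.List.pySetD_natCast]
      have e1 : (pre ++ (m0 :: (l ++ [b])) ++ post).set pre.length (String.ofList [x])
          = pre ++ (String.ofList [x] :: (l ++ [b])) ++ post := by
        simp [List.set_append]
      rw [e1]
      have e2 : ((pre.length : Int) + (m0 :: (l ++ [b])).length - 1)
          = (((pre ++ String.ofList [x] :: l).length : Nat) : Int) := by
        simp; push_cast; ring
      rw [e2, PySem.List.pySetD_natCast]
      have e3 : (pre ++ (String.ofList [x] :: (l ++ [b])) ++ post)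
          = (pre ++ String.ofList [x] :: l) ++ (b :: post) := by simp
      rw [e3, set_append_length]
      have e4 : (pre ++ String.ofList [x] :: l) ++ (String.ofList [x] :: post)
          = (pre ++ [String.ofList [x]]) ++ l ++ (String.ofList [x] :: post) := by simp
      have e5 : ((pre.length : Int) + 1) = (((pre ++ [String.ofList [x]]).length : Nat) : Int) := by
        simp
      have e6 : ((((pre ++ String.ofList [x] :: l).length : Nat) : Int) - 1)
          = (((pre ++ [String.ofList [x]]).length : Nat) : Int) + (l.length : Int) - 1 := by
        push_cast [List.length_append, List.length_cons, List.length_nil]; ring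
      rw [e4, e5, e6, ih (pre ++ [String.ofList [x]]) l (String.ofList [x] :: post) hl]
      have hd : (m0 :: (l ++ [b])).drop (t.length + 1) = l.drop t.length ++ [b] := by
        rw [List.drop_succ_cons, List.drop_append_of_le_length (by omega)]
      have ht : (l.drop t.length ++ [b]).take (l.length - 2 * t.length)
          = (l.drop t.length).take (l.length - 2 * t.length) := by
        apply List.take_append_of_le_length
        simp
        omega
      have hdd : List.drop (x :: t).length (m0 :: (l ++ [b])) = List.drop t.length l ++ [b] := by
        simp only [List.length_cons]; exact hd
      have hn : (m0 :: (l ++ [b])).length - 2 * (x :: t).length = l.length - 2 * t.length := by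
        simp; omega
      rw [hdd, hn, ht]
      simp

theorem mod_two_coe (m : Nat) : (PySem.Int.mod (m : Int) 2 = 1) ↔ m % 2 = 1 := by
  rw [show (2 : Int) = ((2 : Nat) : Int) by norm_num, PySem.Int.mod_natCast]
  omega

theorem floordiv_coe_two (m : Nat) : PySem.Int.floordiv (m : Int) 2 = ((m / 2 : Nat) : Int) := by
  rw [show (2 : Int) = ((2 : Nat) : Int) by norm_num, PySem.Int.floordiv_natCast]

theorem odd_cnt_eq (cs : List Char) :
    ((PySem.Dict.counter cs).values.foldl
        (fun acc v => if PySem.Int.mod v 2 = 1 then acc + 1 else acc) 0)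
      = ((pvOdds cs).length : Int) := by
  have h := PySem.List.foldl_count_if (fun v : Int => decide (PySem.Int.mod v 2 = 1))
    ((PySem.Dict.counter cs).values) 0
  simp only [decide_eq_true_eq] at h
  rw [h]
  unfold pvOdds
  rw [← List.countP_eq_length_filter]
  unfold PySem.Dict.values
  rw [PySem.Dict.items_counter, List.map_map, List.countP_map]
  norm_num
  apply List.countP_congr
  intro k _
  simp only [Function.comp, mod_two_coe]
  by_cases hh : List.count k cs % 2 = 1 <;> simp [hh] <;> omega

theorem filter_P_items (cs : List Char) :
    (PySem.Dict.counter cs).items.filter (fun kv => decide (PySem.Int.mod kv.2 2 = 1))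
      = (pvOdds cs).map (fun k => (k, (cs.count k : Int))) := by
  rw [PySem.Dict.items_counter, List.filter_map]
  unfold pvOdds
  congr 1
  apply List.filter_congr
  intro k _
  simp only [Function.comp, mod_two_coe]
  by_cases hh : List.count k cs % 2 = 1 <;> simp [hh]

theorem foldl_sorted2_items_A (cs : List Char) (f : Char → Int)
    (hf : ∀ k ∈ cs, (PySem.Int.floordiv (f k) 2).toNat = cs.count k / 2) :
    (((PySem.List.sorted2 ((PySem.Set.ofList cs).map (fun k => (k, f k)))
          (fun p => p.1) (fun p => p.2)).map
        (fun p => (p.1, PySem.Int.floordiv p.2 2))).foldl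
        (fun acc kv => acc ++ List.replicate kv.2.toNat kv.1) [])
      = pvHalf cs := by
  rw [sorted2_ofList_map, List.map_map, PySem.List.foldl_append_eq_flatMap, List.nil_append,
    List.flatMap_map]
  unfold pvHalf
  rw [List.flatMap_def, List.flatMap_def]
  refine congrArg List.flatten (List.map_congr_left ?_)
  intro k hk
  have hkcs : k ∈ cs := by
    rw [PySem.List.mem_sorted, PySem.Set.mem_ofList] at hk
    exact hk
  simp only [Function.comp, hf k hkcs]

theorem pv_len (cs : List Char) :
    cs.length = 2 * (pvHalf cs).length + (pvOdds cs).length := by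
  have hperm : (PySem.List.sorted (PySem.Set.ofList cs) (fun x => x)).Perm
      (PySem.Set.ofList cs) := PySem.List.sorted_perm _ _ _
  have h1 : (pvHalf cs).length
      = ((PySem.List.sorted (PySem.Set.ofList cs) (fun x => x)).map
          (fun k => cs.count k / 2)).sum := by
    unfold pvHalf
    rw [List.length_flatMap]
    simp
  have h2 : (pvOdds cs).length
      = (PySem.List.sorted (PySem.Set.ofList cs) (fun x => x)).countP
          (fun k => cs.count k % 2 == 1) := by
    unfold pvOdds
    rw [← List.countP_eq_length_filter]
    exact (hperm.countP_eq _).symm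
  have h3 := sum_counts_eq_length cs _ hperm
  have h4 := sum_eq_two_halves_add_odds (fun k => cs.count k)
    (PySem.List.sorted (PySem.Set.ofList cs) (fun x => x))
  omega

theorem replicate_set_mid {α : Type} (h : Nat) (x y : α) :
    (List.replicate (2 * h + 1) x).set h y = List.replicate h x ++ y :: List.replicate h x := by
  have : List.replicate (2 * h + 1) x
      = List.replicate h x ++ x :: List.replicate h x := by
    rw [show 2 * h + 1 = h + (h + 1) by omega, List.replicate_add, List.replicate_succ]
  rw [this]
  simp [List.set_append]

theorem pvFillA_full (xs : List Char) (mid : List String) (h : 2 * xs.length ≤ mid.length) :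
    pvFillA xs mid 0 ((mid.length : Int) - 1)
      = xs.map (fun c => String.ofList [c])
          ++ (mid.drop xs.length).take (mid.length - 2 * xs.length)
          ++ (xs.map (fun c => String.ofList [c])).reverse := by
  have hs := pvFillA_spec xs [] mid [] h
  simpa using hs

theorem join_parts (l : List Char) :
    PySem.Str.join "" (l.map (fun c => String.ofList [c])) = String.ofList l := by
  unfold PySem.Str.join
  rw [List.map_map]
  have : (String.toList ∘ fun c => String.ofList [c]) = (fun c => [c]) := by
    funext c; simp
  rw [this]
  have h0 : ("" : String).toList = [] := rfl
  rw [h0, PySem.Chars.join_nil_singletons]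

theorem solution_eq_canon (name : String) : solution name = pvCanon name := by
  simp only [solution, pvCanon]
  rw [odd_cnt_eq name.toList]
  by_cases hN1 : 1 < (pvOdds name.toList).length
  · simp [hN1, Nat.one_lt_cast]
  have hc1 : ¬(((pvOdds name.toList).length : Int) > 1) := by exact_mod_cast hN1
  rw [if_neg hc1, if_neg hN1]
  rcases h0 : pvOdds name.toList with _ | ⟨a, t⟩
  · have hlen : name.toList.length = 2 * (pvHalf name.toList).length := by
      have := pv_len name.toList
      rw [h0] at this
      simpa using this
    simp only [List.length_nil, Nat.cast_zero, List.take_nil]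
    rw [if_neg (by norm_num)]
    rw [PySem.Dict.items_counter name.toList,
      foldl_sorted2_items_A name.toList (fun k => ((List.count k name.toList : Nat) : Int))
        (fun k _ => by rw [floordiv_coe_two]; omega)]
    rw [show ((name.toList.length : Int)) = ((List.replicate name.toList.length ("" : String)).length : Int) by simp,
      pvFillA_full _ _ (by simpa using hlen.ge)]
    rw [show (List.replicate name.toList.length ("" : String)).length
        - 2 * (pvHalf name.toList).length = 0 by
          simp only [List.length_replicate, ← String.length_toList]; omega]
    rw [List.take_zero]
    have hparts : (pvHalf name.toList).map (fun c => String.ofList [c]) ++ []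
          ++ ((pvHalf name.toList).map (fun c => String.ofList [c])).reverse
        = (pvHalf name.toList ++ [] ++ (pvHalf name.toList).reverse).map (fun c => String.ofList [c]) := by
      simp
    rw [hparts, join_parts]
  · have ht : t = [] := by
      rw [h0] at hN1
      cases t with
      | nil => rfl
      | cons b u => simp at hN1
    subst ht
    have hmem : a ∈ pvOdds name.toList := by rw [h0]; exact List.mem_cons_self ..
    have hacs : a ∈ name.toList := by
      unfold pvOdds at hmem
      exact (PySem.Set.mem_ofList _ _).1 (List.mem_filter.1 hmem).1
    have haodd : List.count a name.toList % 2 = 1 := by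
      have := (List.mem_filter.1 (by unfold pvOdds at hmem; exact hmem)).2
      simpa using this
    have hlen : name.toList.length = 2 * (pvHalf name.toList).length + 1 := by
      have := pv_len name.toList
      rw [h0] at this
      simpa using this
    have hfilt : (PySem.Dict.counter name.toList).items.filter
        (fun kv => decide (PySem.Int.mod kv.2 2 = 1))
        = [(a, (List.count a name.toList : Int))] := by
      rw [filter_P_items, h0]
      rfl
    have hfold := foldl_if_filter_singleton
      (fun kv : Char × Int => decide (PySem.Int.mod kv.2 2 = 1))
      (fun kv : Char × Int => some kv.1) ((a, (List.count a name.toList : Int)))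
      (PySem.Dict.counter name.toList).items none hfilt
    simp only [decide_eq_true_eq] at hfold
    simp only [List.length_cons, List.length_nil, Nat.cast_ofNat, Nat.cast_one, Nat.zero_add]
    rw [if_pos trivial]
    simp only [hfold]
    rw [items_modify_counter name.toList a hacs,
      foldl_sorted2_items_A name.toList
        (fun k => if k = a then (List.count a name.toList : Int) - 1 else (List.count k name.toList : Int))
        (by
          intro k hk
          beta_reduce
          by_cases hka : k = a
          · rw [hka, if_pos rfl, floordiv_pred_odd _ haodd, floordiv_coe_two]
            omega
          · rw [if_neg hka, floordiv_coe_two]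
            omega)]
    rw [floordiv_coe_two, PySem.List.pySetD_natCast, hlen]
    rw [show (2 * (pvHalf name.toList).length + 1) / 2 = (pvHalf name.toList).length by omega,
      replicate_set_mid]
    have hml : (List.replicate (pvHalf name.toList).length ("" : String)
        ++ String.ofList [a] :: List.replicate (pvHalf name.toList).length ("" : String)).length
        = 2 * (pvHalf name.toList).length + 1 := by
      simp
      omega
    rw [show ((2 * (pvHalf name.toList).length + 1 : Nat) : Int) - 1
        = ((List.replicate (pvHalf name.toList).length ("" : String)
            ++ String.ofList [a] :: List.replicate (pvHalf name.toList).length ("" : String)).length : Int) - 1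
        by rw [hml]]
    rw [pvFillA_full _ _ (by rw [hml]; omega)]
    rw [hml]
    rw [show 2 * (pvHalf name.toList).length + 1 - 2 * (pvHalf name.toList).length = 1 by omega]
    rw [List.drop_left' (by simp : (List.replicate (pvHalf name.toList).length ("" : String)).length
        = (pvHalf name.toList).length)]
    have hparts : (pvHalf name.toList).map (fun c => String.ofList [c])
          ++ (String.ofList [a] :: List.replicate (pvHalf name.toList).length ("" : String)).take 1
          ++ ((pvHalf name.toList).map (fun c => String.ofList [c])).reverse
        = (pvHalf name.toList ++ [a] ++ (pvHalf name.toList).reverse).map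
            (fun c => String.ofList [c]) := by
      simp
    rw [hparts, join_parts]
    simp

-- ===== B-side lemmas =====

-- count of x in the grouped list
theorem count_flatMap_repl (c : Char → Nat) (x : Char) :
    ∀ ks : List Char, (ks.flatMap (fun k => List.replicate (c k) k)).count x
      = if x ∈ ks then ks.count x * c x else 0 := by
  intro ks
  induction ks with
  | nil => simp
  | cons a t ih =>
      rw [List.flatMap_cons, List.count_append, ih, List.count_replicate]
      by_cases hxa : x = a
      · subst hxa
        by_cases hxt : x ∈ t
        · simp [hxt, List.count_cons_self]
          ring
        · have h0 : List.count x t = 0 := List.count_eq_zero.2 hxt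
          simp [hxt, h0]
      · have hax : ¬ a = x := fun h => hxa h.symm
        by_cases hxt : x ∈ t <;>
          simp [hxa, hax, hxt, List.count_cons_of_ne hxa]

-- sorted(name) is the concatenation of the sorted distinct groups
theorem sorted_eq_flatMap_groups (cs : List Char) :
    PySem.List.sorted cs (fun x => x)
      = (PySem.List.sorted (PySem.Set.ofList cs) (fun x => x)).flatMap
          (fun k => List.replicate (cs.count k) k) := by
  have hnd : (PySem.List.sorted (PySem.Set.ofList cs) (fun x => x)).Nodup :=
    (PySem.List.sorted_perm _ _ _).nodup_iff.2 (PySem.Set.nodup_ofList cs)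
  apply PySem.List.sorted_id_eq_of_perm_of_pairwise
  · rw [List.perm_iff_count]
    intro x
    rw [count_flatMap_repl]
    by_cases hx : x ∈ PySem.List.sorted (PySem.Set.ofList cs) (fun x => x)
    · rw [if_pos hx, List.count_eq_one_of_mem hnd hx, one_mul]
    · rw [if_neg hx]
      have : x ∉ cs := by
        intro hmem
        exact hx ((PySem.List.mem_sorted ..).2 ((PySem.Set.mem_ofList ..).2 hmem))
      exact (List.count_eq_zero.2 this).symm
  · -- pairwise ≤ of the grouped list, from pairwise < of the keys
    have hp : (PySem.List.sorted (PySem.Set.ofList cs) (fun x => x)).Pairwise (· < ·) :=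
      PySem.List.sorted_ofList_pairwise_lt cs
    clear hnd
    generalize PySem.List.sorted (PySem.Set.ofList cs) (fun x => x) = ks at hp ⊢
    induction ks with
    | nil => simp
    | cons a t ih =>
        rw [List.flatMap_cons, List.pairwise_append]
        refine ⟨List.pairwise_replicate.2 (Or.inr le_rfl), ih hp.of_cons, ?_⟩
        intro x hx y hy
        have hxa : x = a := (List.eq_of_mem_replicate hx)
        obtain ⟨k, hk, hyk⟩ := List.mem_flatMap.1 hy
        have hyk' : y = k := List.eq_of_mem_replicate hyk
        subst hxa; subst hyk'
        exact le_of_lt ((List.pairwise_cons.1 hp).1 y hk)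

-- one group of 2*k equal characters is consumed pairwise
theorem pvScanB_pairs (a : Char) :
    ∀ (k : Nat) (t : List Char) (half : List Char) (odd : String),
      pvScanB (List.replicate (2 * k) a ++ t) half odd
        = pvScanB t (half ++ List.replicate k a) odd := by
  intro k
  induction k with
  | zero => intro t half odd; simp
  | succ n ih =>
      intro t half odd
      rw [show 2 * (n + 1) = (2 * n) + 1 + 1 by omega]
      rw [List.replicate_succ, List.replicate_succ]
      simp only [List.cons_append, pvScanB, if_pos rfl]
      rw [ih]
      congr 1
      simp [List.replicate_succ, List.append_assoc]

theorem pvScanB_cons_ne (x y : Char) (rest : List Char) (half : List Char) (odd : String)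
    (h : x ≠ y) :
    pvScanB (x :: y :: rest) half odd
      = if odd ≠ "" then none else pvScanB (y :: rest) half (String.ofList [x]) := by
  simp [pvScanB, h]

theorem ofList_singleton_ne_empty (a : Char) : String.ofList [a] ≠ "" := by
  intro hh
  have := congrArg String.toList hh
  simp at this

-- full characterization of the scan over the grouped sorted characters
theorem pvScanB_spec (c : Char → Nat) :
    ∀ ks : List Char, ks.Pairwise (· < ·) → (∀ k ∈ ks, 1 ≤ c k) →
      ∀ (half : List Char) (odd : String),
      pvScanB (ks.flatMap (fun k => List.replicate (c k) k)) half odd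
        = if odd = "" then
            (if 2 ≤ (ks.filter (fun k => c k % 2 == 1)).length then none
             else some (half ++ ks.flatMap (fun k => List.replicate (c k / 2) k),
                        match ks.filter (fun k => c k % 2 == 1) with
                        | [] => "" | a :: _ => String.ofList [a]))
          else
            (if (ks.filter (fun k => c k % 2 == 1)) ≠ [] then none
             else some (half ++ ks.flatMap (fun k => List.replicate (c k / 2) k), odd)) := by
  intro ks
  induction ks with
  | nil =>
      intro _ _ half odd
      by_cases h : odd = "" <;> simp [pvScanB, h]
  | cons a t ih =>
      intro hpw hc half odd
      have hta : ∀ k ∈ t, a < k := fun k hk => (List.pairwise_cons.1 hpw).1 k hk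
      have hc1 : 1 ≤ c a := hc a (by simp)
      have iht := ih hpw.of_cons (fun k hk => hc k (by simp [hk]))
      rw [List.flatMap_cons]
      by_cases hev : c a % 2 = 0
      · -- even group: absorbed into the half
        obtain ⟨k, hk⟩ : ∃ k, c a = 2 * k := ⟨c a / 2, by omega⟩
        rw [hk, pvScanB_pairs, iht]
        have hfa : (a :: t).filter (fun k => c k % 2 == 1)
            = t.filter (fun k => c k % 2 == 1) :=
          List.filter_cons_of_neg (by simp [hev])
        rw [hfa, List.flatMap_cons, show c a / 2 = k by omega]
        by_cases ho : odd = "" <;> simp [ho] <;> split_ifs <;> simp [List.append_assoc]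
      · -- odd group: one leftover becomes the middle or triggers the sentinel
        have hodd : c a % 2 = 1 := by omega
        have hfa : (a :: t).filter (fun k => c k % 2 == 1)
            = a :: t.filter (fun k => c k % 2 == 1) :=
          List.filter_cons_of_pos (by simp [hodd])
        have hrep : List.replicate (c a) a = List.replicate (2 * (c a / 2)) a ++ [a] := by
          rw [← List.replicate_succ']
          congr 1
          omega
        rw [hrep, List.append_assoc, pvScanB_pairs]
        have hhalfa : List.flatMap (fun k => List.replicate (c k / 2) k) (a :: t)
            = List.replicate (c a / 2) a ++ List.flatMap (fun k => List.replicate (c k / 2) k) t :=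
          List.flatMap_cons ..
        cases t with
        | nil =>
            by_cases ho : odd = "" <;>
              simp [pvScanB, ho, hfa, hhalfa]
        | cons b t' =>
            have hab : a ≠ b := ne_of_lt (hta b (by simp))
            have hcb : 1 ≤ c b := hc b (by simp)
            have hflat : List.flatMap (fun k => List.replicate (c k) k) (b :: t')
                = b :: (List.replicate (c b - 1) b
                    ++ List.flatMap (fun k => List.replicate (c k) k) t') := by
              rw [List.flatMap_cons, show c b = (c b - 1) + 1 by omega, List.replicate_succ]
              simp
            rw [hflat]
            simp only [List.singleton_append]
            rw [pvScanB_cons_ne a b _ _ odd hab]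
            by_cases ho : odd = ""
            · rw [if_neg (by simp [ho]), ← hflat,
                iht (half ++ List.replicate (c a / 2) a) (String.ofList [a]),
                if_neg (ofList_singleton_ne_empty a)]
              rw [if_pos ho, hfa, hhalfa]
              by_cases hft : (b :: t').filter (fun k => c k % 2 == 1) = []
              · rw [hft]
                simp [List.append_assoc]
              · have h1 : 0 < ((b :: t').filter fun k => c k % 2 == 1).length :=
                  List.length_pos_iff.2 hft
                rw [if_pos hft, if_pos (by simp only [List.length_cons]; omega)]
            · rw [if_pos (by simpa using ho), if_neg ho, if_pos (by rw [hfa]; simp)]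

theorem perm_take_one_eq {l₁ l₂ : List Char} (hp : l₁.Perm l₂) (hle : l₁.length ≤ 1) :
    l₁ = l₂ := by
  match l₁, l₂, hp.length_eq with
  | [], [], _ => rfl
  | [x], [y], _ =>
      have := hp.mem_iff (a := x)
      simp at this
      rw [this]
  | x :: y :: t, _, h => simp at hle

theorem solution_alt_eq_canon (name : String) : solution_alt name = pvCanon name := by
  simp only [solution_alt, pvCanon]
  have hkpw : (PySem.List.sorted (PySem.Set.ofList name.toList) (fun x => x)).Pairwise (· < ·) :=
    PySem.List.sorted_ofList_pairwise_lt name.toList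
  have hkc : ∀ k ∈ PySem.List.sorted (PySem.Set.ofList name.toList) (fun x => x),
      1 ≤ List.count k name.toList := by
    intro k hk
    have : k ∈ name.toList := (PySem.Set.mem_ofList ..).1 ((PySem.List.mem_sorted ..).1 hk)
    exact List.count_pos_iff.2 this
  rw [sorted_eq_flatMap_groups name.toList,
    pvScanB_spec (fun k => name.toList.count k) _ hkpw hkc [] "", if_pos rfl]
  have hperm : ((PySem.List.sorted (PySem.Set.ofList name.toList) (fun x => x)).filter
      (fun k => name.toList.count k % 2 == 1)).Perm (pvOdds name.toList) := by
    unfold pvOdds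
    exact (PySem.List.sorted_perm _ _ _).filter _
  have hlen := hperm.length_eq
  have hH : (PySem.List.sorted (PySem.Set.ofList name.toList) (fun x => x)).flatMap
      (fun k => List.replicate (name.toList.count k / 2) k) = pvHalf name.toList := rfl
  by_cases h2 : 2 ≤ ((PySem.List.sorted (PySem.Set.ofList name.toList) (fun x => x)).filter
      (fun k => name.toList.count k % 2 == 1)).length
  · rw [if_pos h2, if_pos (by omega)]
  · rw [if_neg h2, if_neg (by omega)]
    have heq := perm_take_one_eq hperm (by omega)
    rw [heq, hH]
    cases ho : pvOdds name.toList with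
    | nil => simp
    | cons x t => simp

-- ===== VERDICT (by name: the statement is the Claim_ definition above) =====
theorem solution_spec : Claim_equal_solution := by
  intro name _
  unfold Spec_solution
  exact (solution_eq_canon name).trans (solution_alt_eq_canon name).symm
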